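-- pv_equiv track=rewrite | github.com/981377660LMT/algorithm-study | 11_动态规划/经典题/dfs+cache/3544. 子树反转和.py | subtreeInversionSum
-- ===== SOURCE A (Python) =====
-- from collections import deque
-- from functools import lru_cache
-- from typing import List
--
-- def max2(a: int, b: int) -> int:
--     return a if a > b else b
--
-- def subtreeInversionSum(edges: List[List[int]], nums: List[int], k: int) -> int:
--     """O(nk)解法."""
--
--     def toRootedTree(tree: List[List[int]], root=0) -> List[List[int]]:
--         n = len(tree)
--         res = [[] for _ in range(n)]
--         visited = [False] * n
--         visited[root] = True
--         queue = deque([root])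
--         while queue:
--             cur = queue.popleft()
--             for next in tree[cur]:
--                 if not visited[next]:
--                     visited[next] = True
--                     queue.append(next)
--                     res[cur].append(next)
--         return res
--
--     n = len(nums)
--     adjList = [[] for _ in range(n)]
--     for u, v in edges:
--         adjList[u].append(v)
--         adjList[v].append(u)
--     adjList = toRootedTree(adjList)
--
--     @lru_cache(None)
--     def dfs(cur: int, cd: int, mul: int) -> int:
--         # 不反转
--         res = nums[cur] * mul
--         for next in adjList[cur]:
--             res += dfs(next, cd - 1 if cd else 0, mul)
--
--         # 反转
--         if cd == 0:
--             mul *= -1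
--             res2 = nums[cur] * mul
--             for next in adjList[cur]:
--                 res2 += dfs(next, k - 1, mul)
--             res = max2(res, res2)
--
--         return res
--
--     res = dfs(0, 0, 1)
--     dfs.cache_clear()
--     return res
-- ===== SOURCE B (Python) =====
-- from collections import deque
-- from typing import List
--
--
-- def subtreeInversionSum(edges: List[List[int]], nums: List[int], k: int) -> int:
--     """Single pass over the rooted tree: each node is visited once and returns its
--     whole DP table (one row per cooldown state, for both signs), with the cooldown
--     range clamped to min(k, n + 1) since longer cooldowns never expire in the tree."""
--     n = len(nums)
--     adjList = [[] for _ in range(n)]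
--     for u, v in edges:
--         adjList[u].append(v)
--         adjList[v].append(u)
--
--     # root the tree at 0 (BFS), as in the original
--     tree = [[] for _ in range(n)]
--     visited = [False] * n
--     visited[0] = True
--     queue = deque([0])
--     while queue:
--         cur = queue.popleft()
--         for nxt in adjList[cur]:
--             if not visited[nxt]:
--                 visited[nxt] = True
--                 queue.append(nxt)
--                 tree[cur].append(nxt)
--
--     C = min(k, n + 1)  # cooldown states 0..C-1; state C-1 absorbs every larger cooldown
--     fc = min(k - 1, C - 1)  # child state right after a flip
--
--     def solve(v: int):
--         # returns (pos, neg): pos[c] = best sum for v's subtree with multiplier +1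
--         # and cooldown state c; neg[c] the same with multiplier -1
--         kids = [solve(c) for c in tree[v]]
--         pos, neg = [], []
--         for c in range(C):
--             cc = c - 1 if c > 0 else 0
--             p = nums[v] + sum(kp[cc] for kp, _ in kids)
--             q = -nums[v] + sum(kn[cc] for _, kn in kids)
--             if c == 0:
--                 p = max(p, -nums[v] + sum(kn[fc] for _, kn in kids))
--                 q = max(q, nums[v] + sum(kp[fc] for kp, _ in kids))
--             pos.append(p)
--             neg.append(q)
--         return pos, neg
--
--     return solve(0)[0][0]
-- ===== Notes on version B (the rewrite author's own statement) =====
-- stated objective: alternative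
-- what changed: A's lru_cache-memoized top-down dfs over (node, cooldown, sign) scalars is replaced by a single pass that visits each node once and returns its whole DP table (one row per cooldown state, for both signs), with the cooldown range clamped to min(k, n+1) since longer cooldowns never expire inside the tree.
-- outside the precondition, e.g. on subtreeInversionSum([], [5], 0): A returns 5, B raises IndexError; on subtreeInversionSum([[0, 1]], [3, -2], -4): A returns 5, B raises IndexError
import Mathlib
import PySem

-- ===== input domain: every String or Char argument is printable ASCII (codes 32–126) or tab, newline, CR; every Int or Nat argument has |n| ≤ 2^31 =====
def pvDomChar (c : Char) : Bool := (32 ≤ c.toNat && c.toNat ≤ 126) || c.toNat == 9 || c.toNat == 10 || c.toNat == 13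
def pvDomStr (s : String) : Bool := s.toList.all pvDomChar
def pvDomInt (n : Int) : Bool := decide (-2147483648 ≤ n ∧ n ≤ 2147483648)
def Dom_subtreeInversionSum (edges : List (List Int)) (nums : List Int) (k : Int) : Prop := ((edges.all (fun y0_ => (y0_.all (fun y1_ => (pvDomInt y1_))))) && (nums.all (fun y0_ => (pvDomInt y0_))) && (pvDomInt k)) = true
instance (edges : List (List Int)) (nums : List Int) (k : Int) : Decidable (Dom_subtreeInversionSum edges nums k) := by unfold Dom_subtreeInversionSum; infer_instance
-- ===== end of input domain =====

-- B replaces A's memoized per-(node, cooldown, sign) scalar recursion by a single pass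
-- that visits each node once and returns its whole DP table (one row per cooldown state,
-- clamped to min(k, n+1), for both signs); objective: alternative decomposition.

-- ===== SHARED HELPERS (both Pythons build the adjacency list and the rooted tree with the
-- same code, so the ports share these; Python list indexing wraps a negative index once) =====

-- Python index normalisation: adjList[i] / visited[i] / nums[i] for -n ≤ i < n
def pvIdx (n : Nat) (i : Int) : Nat := (if i < 0 then i + n else i).toNat

-- adjList[u].append(v)  (u wrapped at use, v stored raw as Python does)
def pvAppendAt (n : Nat) (adj : Array (List Int)) (u : Int) (v : Int) : Array (List Int) :=
  adj.setIfInBounds (pvIdx n u) (adj.getD (pvIdx n u) [] ++ [v])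

-- for u, v in edges: adjList[u].append(v); adjList[v].append(u)
-- (an edge that is not a 2-list makes Python raise; such inputs are outside Pre_)
def pvBuildAdj (edges : List (List Int)) (n : Nat) : Array (List Int) :=
  edges.foldl (fun adj e =>
    match e with
    | [u, v] => pvAppendAt n (pvAppendAt n adj u v) v u
    | _ => adj) (Array.replicate n [])

-- the BFS while-loop of toRootedTree; state = (queue, visited, res); fuel = n bounds the
-- number of dequeues (each enqueued node is freshly marked visited, so ≤ n enqueues)
def pvBfs (adj : Array (List Int)) (n : Nat) : Nat → List Nat → Array Bool → Array (List Nat) → Array (List Nat)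
  | 0, _, _, res => res
  | _ + 1, [], _, res => res
  | f + 1, cur :: queue, vis, res =>
    let s := (adj.getD cur []).foldl
      (fun (s : List Nat × Array Bool × Array (List Nat)) nxI =>
        let nx := pvIdx n nxI
        if s.2.1.getD nx false then s
        else (s.1 ++ [nx], s.2.1.setIfInBounds nx true,
              s.2.2.setIfInBounds cur (s.2.2.getD cur [] ++ [nx])))
      (queue, vis, res)
    pvBfs adj n f s.1 s.2.1 s.2.2

-- adjList = toRootedTree(adjacency of edges), rooted at 0
def pvRooted (edges : List (List Int)) (n : Nat) : Array (List Nat) :=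
  pvBfs (pvBuildAdj edges n) n n [0] ((Array.replicate n false).setIfInBounds 0 true) (Array.replicate n [])

-- ===== PORT A =====

def pvMax2 (a b : Int) : Int := if a > b then a else b

-- dfs(cur, cd, mul) of A, with fuel n (the rooted tree has depth < n)
def pvDfsA (g : Array (List Nat)) (nums : List Int) (k : Int) : Nat → Nat → Int → Int → Int
  | 0, _, _, _ => 0
  | f + 1, cur, cd, mul =>
    let res := (g.getD cur []).foldl
      (fun acc nx => acc + pvDfsA g nums k f nx (if cd ≠ 0 then cd - 1 else 0) mul)
      (nums.getD cur 0 * mul)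
    if cd = 0 then
      let res2 := (g.getD cur []).foldl
        (fun acc nx => acc + pvDfsA g nums k f nx (k - 1) (-mul))
        (nums.getD cur 0 * (-mul))
      pvMax2 res res2
    else res

def subtreeInversionSum (edges : List (List Int)) (nums : List Int) (k : Int) : Int :=
  let n := nums.length
  pvDfsA (pvRooted edges n) nums k n 0 0 1

-- ===== PORT B =====

-- solve(v) of B: one visit per node, returning the whole table (pos row, neg row) over
-- cooldown states 0..C-1; fuel as in A's port (the value at fuel 0 is never reached for
-- fuel ≥ tree depth; rows of zeros are chosen there)
def pvSolveB (g : Array (List Nat)) (nums : List Int) (k : Int) (C fc : Nat) : Nat → Nat → List Int × List Int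
  | 0, _ => (List.replicate C 0, List.replicate C 0)
  | f + 1, v =>
    let kids := (g.getD v []).map (fun c => pvSolveB g nums k C fc f c)
    (List.range C).foldl
      (fun (pq : List Int × List Int) c =>
        let cc := if 0 < c then c - 1 else 0
        let p0 := nums.getD v 0 + (kids.map (fun t => t.1.getD cc 0)).sum
        let q0 := -nums.getD v 0 + (kids.map (fun t => t.2.getD cc 0)).sum
        let p := if c = 0 then max p0 (-nums.getD v 0 + (kids.map (fun t => t.2.getD fc 0)).sum) else p0
        let q := if c = 0 then max q0 (nums.getD v 0 + (kids.map (fun t => t.1.getD fc 0)).sum) else q0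
        (pq.1 ++ [p], pq.2 ++ [q]))
      ([], [])

def subtreeInversionSum_alt (edges : List (List Int)) (nums : List Int) (k : Int) : Int :=
  let n := nums.length
  let Cint : Int := min k ((n : Int) + 1)
  let fcInt : Int := min (k - 1) (Cint - 1)
  ((pvSolveB (pvRooted edges n) nums k Cint.toNat fcInt.toNat n 0).1.getD 0 0)

-- ===== PRECONDITION & SPEC =====
-- Pre_ is the problem's natural domain: nums non-empty, cooldown k ≥ 1 (the LeetCode
-- constraint), every edge a 2-list of node indices valid for Python's list indexing
-- (-n ≤ i < n). Outside it A raises (empty nums, malformed or out-of-range edges) except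
-- for k ≤ 0, where B's own algorithm raises (its table of cooldown states is empty).
def Pre_subtreeInversionSum (edges : List (List Int)) (nums : List Int) (k : Int) : Prop :=
  nums ≠ [] ∧ 1 ≤ k ∧
    ∀ e ∈ edges, e.length = 2 ∧ ∀ x ∈ e, -(nums.length : Int) ≤ x ∧ x < (nums.length : Int)
instance (edges : List (List Int)) (nums : List Int) (k : Int) : Decidable (Pre_subtreeInversionSum edges nums k) := by
  unfold Pre_subtreeInversionSum; infer_instance

def pvWitness_subtreeInversionSum : List (List Int) × List Int × Int := ([[0, 1], [0, 2]], [3, -2, 4], 2)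

def Spec_subtreeInversionSum (edges : List (List Int)) (nums : List Int) (k : Int) (out : Int) : Prop := out = subtreeInversionSum_alt edges nums k
instance (edges : List (List Int)) (nums : List Int) (k : Int) (out : Int) : Decidable (Spec_subtreeInversionSum edges nums k out) := by unfold Spec_subtreeInversionSum; infer_instance

-- ===== CLAIM (what is proved, stated in full; the proofs are below) =====
def Claim_equal_subtreeInversionSum : Prop := ∀ (edges : List (List Int)) (nums : List Int) (k : Int), Dom_subtreeInversionSum edges nums k → Pre_subtreeInversionSum edges nums k → Spec_subtreeInversionSum edges nums k (subtreeInversionSum edges nums k)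

-- ===== LEMMAS AND PROOFS =====

theorem pvMax2_eq_max (a b : Int) : pvMax2 a b = max a b := by
  unfold pvMax2; omega

-- replacing the summand of an accumulating fold pointwise
theorem pv_foldl_add_congr {F G : Nat → Int} (h : ∀ x, F x = G x) (l : List Nat) (a : Int) :
    l.foldl (fun acc nx => acc + F nx) a = l.foldl (fun acc nx => acc + G nx) a := by
  have : F = G := funext h
  rw [this]

-- the pair-building fold of pvSolveB is a pair of maps
theorem pv_foldl_pair_map (P Q : Nat → Int) (l : List Nat) (p q : List Int) :
    l.foldl (fun (pq : List Int × List Int) c => (pq.1 ++ [P c], pq.2 ++ [Q c])) (p, q)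
      = (p ++ l.map P, q ++ l.map Q) := by
  induction l generalizing p q with
  | nil => simp
  | cons x xs ih => simp [List.foldl_cons, ih]

-- Lemma L: with fuel f, two cooldowns that are both ≥ f give the same dfs value
-- (the flip branch cannot be reached before the fuel runs out)
theorem pvDfsA_large_cd (g : Array (List Nat)) (nums : List Int) (k : Int) :
    ∀ (f : Nat) (v : Nat) (mul cd cd' : Int), (f : Int) ≤ cd → (f : Int) ≤ cd' →
      pvDfsA g nums k f v cd mul = pvDfsA g nums k f v cd' mul := by
  intro f
  induction f with
  | zero => intro v mul cd cd' _ _; rfl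
  | succ f ih =>
    intro v mul cd cd' hcd hcd'
    have h1 : cd ≠ 0 := by omega
    have h2 : cd' ≠ 0 := by omega
    simp only [pvDfsA, h1, h2, if_true, ne_eq, not_false_eq_true, if_neg]
    rw [pv_foldl_add_congr (fun nx => ih nx mul (cd - 1) (cd' - 1) (by omega) (by omega))]

theorem pvSolveB_succ (g : Array (List Nat)) (nums : List Int) (k : Int) (C fc : Nat) (f : Nat) (v : Nat) :
    pvSolveB g nums k C fc (f + 1) v =
      ((List.range C).map (fun c =>
          let kids := (g.getD v []).map (fun c => pvSolveB g nums k C fc f c)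
          let cc := if 0 < c then c - 1 else 0
          let p0 := nums.getD v 0 + (kids.map (fun t => t.1.getD cc 0)).sum
          if c = 0 then max p0 (-nums.getD v 0 + (kids.map (fun t => t.2.getD fc 0)).sum) else p0),
       (List.range C).map (fun c =>
          let kids := (g.getD v []).map (fun c => pvSolveB g nums k C fc f c)
          let cc := if 0 < c then c - 1 else 0
          let q0 := -nums.getD v 0 + (kids.map (fun t => t.2.getD cc 0)).sum
          if c = 0 then max q0 (nums.getD v 0 + (kids.map (fun t => t.1.getD fc 0)).sum) else q0)) := by
  show (List.range C).foldl _ ([], []) = _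
  exact pv_foldl_pair_map _ _ (List.range C) [] []

theorem pv_getD_range_map (F : Nat → Int) (C c : Nat) (h : c < C) :
    ((List.range C).map F).getD c 0 = F c := by
  rw [List.getD_eq_getElem?_getD, List.getElem?_map, List.getElem?_range h]
  rfl



theorem pv_main (g : Array (List Nat)) (nums : List Int) (k : Int) (hk : 1 ≤ k) :
    ∀ (f : Nat), f ≤ nums.length → ∀ (v c : Nat), c < (min k ((nums.length : Int) + 1)).toNat →
      pvDfsA g nums k f v (c : Int) 1
        = (pvSolveB g nums k (min k ((nums.length : Int) + 1)).toNat (min (k - 1) (min k ((nums.length : Int) + 1) - 1)).toNat f v).1.getD c 0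
      ∧ pvDfsA g nums k f v (c : Int) (-1)
        = (pvSolveB g nums k (min k ((nums.length : Int) + 1)).toNat (min (k - 1) (min k ((nums.length : Int) + 1) - 1)).toNat f v).2.getD c 0 := by
  intro f
  induction f with
  | zero =>
    intro _ v c hc
    constructor <;>
      simp [pvDfsA, pvSolveB, List.getD_eq_getElem?_getD, hc]
  | succ f ih =>
    intro hf v c hc
    have hf' : f ≤ nums.length := by omega
    set Cn := (min k ((nums.length : Int) + 1)).toNat with hCdef
    set fcn := (min (k - 1) (min k ((nums.length : Int) + 1) - 1)).toNat with hfcdef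
    have hC1 : 1 ≤ Cn := by omega
    have hfc_lt : fcn < Cn := by omega
    have hflip : ∀ (nx : Nat) (mul : Int),
        pvDfsA g nums k f nx (k - 1) mul = pvDfsA g nums k f nx (fcn : Int) mul := by
      intro nx mul
      by_cases hge : min k ((nums.length : Int) + 1) ≤ k - 1
      · exact pvDfsA_large_cd g nums k f nx mul _ _ (by omega) (by omega)
      · have h : (fcn : Int) = k - 1 := by omega
        rw [h]
    -- the two kinds of child sums, as rows of B's tables
    have hrow1 : ∀ j : Nat, j < Cn →
        (g.getD v []).map (fun nx => pvDfsA g nums k f nx (j : Int) 1)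
          = ((g.getD v []).map (fun nx => pvSolveB g nums k Cn fcn f nx)).map (fun t => t.1.getD j 0) := by
      intro j hj
      rw [List.map_map]
      exact List.map_congr_left (fun nx _ => (ih hf' nx j hj).1)
    have hrow2 : ∀ j : Nat, j < Cn →
        (g.getD v []).map (fun nx => pvDfsA g nums k f nx (j : Int) (-1))
          = ((g.getD v []).map (fun nx => pvSolveB g nums k Cn fcn f nx)).map (fun t => t.2.getD j 0) := by
      intro j hj
      rw [List.map_map]
      exact List.map_congr_left (fun nx _ => (ih hf' nx j hj).2)
    have hfl1 : List.map (fun x => pvDfsA g nums k f x (k - 1) 1) (g.getD v [])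
        = List.map (fun t => t.1.getD fcn 0) (List.map (fun nx => pvSolveB g nums k Cn fcn f nx) (g.getD v [])) := by
      rw [List.map_congr_left (fun nx _ => hflip nx 1), hrow1 fcn hfc_lt]
    have hfl2 : List.map (fun x => pvDfsA g nums k f x (k - 1) (-1)) (g.getD v [])
        = List.map (fun t => t.2.getD fcn 0) (List.map (fun nx => pvSolveB g nums k Cn fcn f nx) (g.getD v [])) := by
      rw [List.map_congr_left (fun nx _ => hflip nx (-1)), hrow2 fcn hfc_lt]
    rcases Nat.eq_zero_or_pos c with hc0 | hcpos
    · subst hc0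
      have h01 := hrow1 0 hc
      have h02 := hrow2 0 hc
      simp only [Nat.cast_zero] at h01 h02
      constructor
      · -- mul = 1, c = 0
        rw [pvSolveB_succ, pv_getD_range_map _ _ _ hc]
        simp only [pvDfsA, Nat.cast_zero, ne_eq, not_true_eq_false, if_false, ite_true,
          PySem.List.foldl_add, pvMax2_eq_max, mul_one, mul_neg_one]
        rw [h01, hfl2]
        norm_num
      · -- mul = -1, c = 0
        rw [pvSolveB_succ, pv_getD_range_map _ _ _ hc]
        simp only [pvDfsA, Nat.cast_zero, ne_eq, not_true_eq_false, if_false, ite_true,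
          PySem.List.foldl_add, pvMax2_eq_max, neg_neg, mul_one, mul_neg_one]
        rw [h02, hfl1]
        norm_num
    · -- c > 0
      have hcne : (c : Int) ≠ 0 := by omega
      have hcne' : c ≠ 0 := by omega
      have hcast : (c : Int) - 1 = ((c - 1 : Nat) : Int) := by omega
      have hlt : c - 1 < Cn := by omega
      have h11 := hrow1 (c - 1) hlt
      have h12 := hrow2 (c - 1) hlt
      constructor
      · rw [pvSolveB_succ, pv_getD_range_map _ _ _ hc]
        simp only [pvDfsA, hcne, hcne', ne_eq, not_false_eq_true, if_true,
          if_neg, PySem.List.foldl_add, mul_one, if_pos hcpos]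
        rw [hcast, h11]
      · rw [pvSolveB_succ, pv_getD_range_map _ _ _ hc]
        simp only [pvDfsA, hcne, hcne', ne_eq, not_false_eq_true, if_true,
          if_neg, PySem.List.foldl_add, mul_neg_one, if_pos hcpos]
        rw [hcast, h12]

-- ===== VERDICT (by name: the statement is the Claim_ definition above) =====
theorem subtreeInversionSum_spec : Claim_equal_subtreeInversionSum := by
  intro edges nums k _ hpre
  obtain ⟨hne, hk, -⟩ := hpre
  unfold Spec_subtreeInversionSum subtreeInversionSum subtreeInversionSum_alt
  have hC : 0 < (min k ((nums.length : Int) + 1)).toNat := by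
    have : (1 : Int) ≤ min k ((nums.length : Int) + 1) := by omega
    omega
  have := (pv_main (pvRooted edges nums.length) nums k hk nums.length le_rfl 0 0 hC).1
  simpa using this
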